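-- pv_equiv track=rewrite | github.com/commitsun/BookAi | core/db.py | _aggregate_meta_whatsapp_status
-- ===== SOURCE A (Python) =====
-- def _aggregate_meta_whatsapp_status(receipts: dict) -> str:
--     if not isinstance(receipts, dict) or not receipts:
--         return "pending"
--     statuses = {
--         str((item or {}).get("delivery_status") or "").strip().lower()
--         for item in receipts.values()
--         if isinstance(item, dict)
--     }
--     if "failed" in statuses:
--         return "failed"
--     if "read" in statuses:
--         return "read"
--     if "delivered" in statuses:
--         return "delivered"
--     if "sent" in statuses:
--         return "sent"
--     return "pending"
-- ===== SOURCE B (Python) =====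
-- def _rank(s):
--     if s == "failed":
--         return 4
--     if s == "read":
--         return 3
--     if s == "delivered":
--         return 2
--     if s == "sent":
--         return 1
--     return 0
--
--
-- def _name(r):
--     if r == 4:
--         return "failed"
--     if r == 3:
--         return "read"
--     if r == 2:
--         return "delivered"
--     if r == 1:
--         return "sent"
--     return "pending"
--
--
-- def _aggregate_meta_whatsapp_status(receipts: dict) -> str:
--     if not isinstance(receipts, dict) or not receipts:
--         return "pending"
--     best = 0
--     for item in receipts.values():
--         if isinstance(item, dict):
--             s = str((item or {}).get("delivery_status") or "").strip().lower()
--             best = max(best, _rank(s))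
--     return _name(best)
-- ===== Notes on version B (the rewrite author's own statement) =====
-- stated objective: simpler
-- what changed: Replaces A's set comprehension plus four sequential membership tests by a single running-maximum pass over a numeric priority rank, mapped back to the status name at the end.
import Mathlib
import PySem

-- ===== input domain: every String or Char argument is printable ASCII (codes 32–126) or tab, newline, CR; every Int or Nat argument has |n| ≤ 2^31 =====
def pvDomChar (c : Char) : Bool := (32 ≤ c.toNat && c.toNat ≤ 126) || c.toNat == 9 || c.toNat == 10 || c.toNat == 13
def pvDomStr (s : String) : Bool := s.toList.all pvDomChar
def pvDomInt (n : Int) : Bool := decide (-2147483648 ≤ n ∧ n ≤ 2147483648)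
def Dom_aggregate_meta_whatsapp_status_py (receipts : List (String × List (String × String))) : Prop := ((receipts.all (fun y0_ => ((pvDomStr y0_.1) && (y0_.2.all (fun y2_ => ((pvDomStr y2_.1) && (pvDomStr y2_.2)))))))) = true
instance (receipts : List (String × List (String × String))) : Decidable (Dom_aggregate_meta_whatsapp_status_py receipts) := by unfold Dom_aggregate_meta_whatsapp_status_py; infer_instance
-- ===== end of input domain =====

-- B replaces A's set comprehension plus four membership tests by a single running-maximum
-- pass over a numeric priority rank (objective: simpler; same asymptotic cost).

-- shared normalisation: str((item or {}).get("delivery_status") or "").strip().lower()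
-- (".get(…) or ''" equals getD with default "" because strip/lower of "" is "")
def pvNorm (item : List (String × String)) : String :=
  PySem.Str.lower (PySem.Str.strip (PySem.Dict.getD (PySem.Dict.mk item) "delivery_status" ""))

-- ===== PORT A =====
def aggregate_meta_whatsapp_status_py (receipts : List (String × List (String × String))) : String :=
  if receipts = [] then "pending"
  else
    let statuses : PySem.Set String := PySem.Set.ofList ((receipts.map Prod.snd).map pvNorm)
    if "failed" ∈ statuses then "failed"
    else if "read" ∈ statuses then "read"
    else if "delivered" ∈ statuses then "delivered"
    else if "sent" ∈ statuses then "sent"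
    else "pending"

-- ===== PORT B =====
def pvRank (s : String) : Nat :=
  if s = "failed" then 4
  else if s = "read" then 3
  else if s = "delivered" then 2
  else if s = "sent" then 1
  else 0

def pvName (r : Nat) : String :=
  if r = 4 then "failed"
  else if r = 3 then "read"
  else if r = 2 then "delivered"
  else if r = 1 then "sent"
  else "pending"

def aggregate_meta_whatsapp_status_py_alt (receipts : List (String × List (String × String))) : String :=
  if receipts = [] then "pending"
  else
    pvName ((receipts.map Prod.snd).foldl (fun best item => max best (pvRank (pvNorm item))) 0)

-- ===== PRECONDITION & SPEC =====
def Spec_aggregate_meta_whatsapp_status_py (receipts : List (String × List (String × String))) (out : String) : Prop := out = aggregate_meta_whatsapp_status_py_alt receipts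
instance (receipts : List (String × List (String × String))) (out : String) : Decidable (Spec_aggregate_meta_whatsapp_status_py receipts out) := by unfold Spec_aggregate_meta_whatsapp_status_py; infer_instance

-- ===== CLAIM (what is proved, stated in full; the proofs are below) =====
def Claim_equal_aggregate_meta_whatsapp_status_py : Prop := ∀ (receipts : List (String × List (String × String))), Dom_aggregate_meta_whatsapp_status_py receipts → Spec_aggregate_meta_whatsapp_status_py receipts (aggregate_meta_whatsapp_status_py receipts)

-- ===== LEMMAS AND PROOFS =====

def pvMR (L : List String) : Nat := L.foldl (fun m s => max m (pvRank s)) 0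

theorem pvMR_foldl (L : List String) (a : Nat) :
    L.foldl (fun m s => max m (pvRank s)) a = max a (pvMR L) := by
  induction L generalizing a with
  | nil => simp [pvMR]
  | cons s L ih =>
    simp only [pvMR, List.foldl_cons] at *
    rw [ih, ih (max 0 (pvRank s))]
    omega

theorem pvMR_cons (s : String) (L : List String) :
    pvMR (s :: L) = max (pvRank s) (pvMR L) := by
  simp only [pvMR, List.foldl_cons]
  rw [pvMR_foldl]
  simp only [pvMR]
  omega

theorem pvRank_le (s : String) : pvRank s ≤ 4 := by
  unfold pvRank; split_ifs <;> omega

theorem pvMR_le (L : List String) : pvMR L ≤ 4 := by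
  induction L with
  | nil => simp [pvMR]
  | cons s L ih => rw [pvMR_cons]; have := pvRank_le s; omega

theorem pvMR_ge_iff (L : List String) (k : Nat) (hk : 1 ≤ k) :
    k ≤ pvMR L ↔ ∃ s ∈ L, k ≤ pvRank s := by
  induction L with
  | nil => simp [pvMR]; omega
  | cons s L ih =>
    rw [pvMR_cons, le_max_iff, ih]
    simp only [List.mem_cons]
    constructor
    · rintro (h | ⟨t, ht, h⟩)
      · exact ⟨s, Or.inl rfl, h⟩
      · exact ⟨t, Or.inr ht, h⟩
    · rintro ⟨t, (rfl | ht), h⟩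
      · exact Or.inl h
      · exact Or.inr ⟨t, ht, h⟩

theorem pvRank_ge4 (s : String) : 4 ≤ pvRank s ↔ s = "failed" := by
  unfold pvRank; split_ifs <;> simp_all
theorem pvRank_ge3 (s : String) : 3 ≤ pvRank s ↔ s = "failed" ∨ s = "read" := by
  unfold pvRank; split_ifs <;> simp_all
theorem pvRank_ge2 (s : String) : 2 ≤ pvRank s ↔ s = "failed" ∨ s = "read" ∨ s = "delivered" := by
  unfold pvRank; split_ifs <;> simp_all
theorem pvRank_ge1 (s : String) : 1 ≤ pvRank s ↔ s = "failed" ∨ s = "read" ∨ s = "delivered" ∨ s = "sent" := by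
  unfold pvRank; split_ifs <;> simp_all

theorem pvCore (L : List String) :
    (if "failed" ∈ L then "failed"
     else if "read" ∈ L then "read"
     else if "delivered" ∈ L then "delivered"
     else if "sent" ∈ L then "sent"
     else "pending") = pvName (pvMR L) := by
  have h4 : (4 ≤ pvMR L) ↔ "failed" ∈ L := by
    rw [pvMR_ge_iff L 4 (by omega)]; simp [pvRank_ge4]
  have h3 : (3 ≤ pvMR L) ↔ ("failed" ∈ L ∨ "read" ∈ L) := by
    rw [pvMR_ge_iff L 3 (by omega)]
    simp only [pvRank_ge3]
    constructor
    · rintro ⟨t, ht, (rfl | rfl)⟩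
      · exact Or.inl ht
      · exact Or.inr ht
    · rintro (h | h)
      · exact ⟨_, h, Or.inl rfl⟩
      · exact ⟨_, h, Or.inr rfl⟩
  have h2 : (2 ≤ pvMR L) ↔ ("failed" ∈ L ∨ "read" ∈ L ∨ "delivered" ∈ L) := by
    rw [pvMR_ge_iff L 2 (by omega)]
    simp only [pvRank_ge2]
    constructor
    · rintro ⟨t, ht, (rfl | rfl | rfl)⟩
      · exact Or.inl ht
      · exact Or.inr (Or.inl ht)
      · exact Or.inr (Or.inr ht)
    · rintro (h | h | h)
      · exact ⟨_, h, Or.inl rfl⟩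
      · exact ⟨_, h, Or.inr (Or.inl rfl)⟩
      · exact ⟨_, h, Or.inr (Or.inr rfl)⟩
  have h1 : (1 ≤ pvMR L) ↔ ("failed" ∈ L ∨ "read" ∈ L ∨ "delivered" ∈ L ∨ "sent" ∈ L) := by
    rw [pvMR_ge_iff L 1 (by omega)]
    simp only [pvRank_ge1]
    constructor
    · rintro ⟨t, ht, (rfl | rfl | rfl | rfl)⟩
      · exact Or.inl ht
      · exact Or.inr (Or.inl ht)
      · exact Or.inr (Or.inr (Or.inl ht))
      · exact Or.inr (Or.inr (Or.inr ht))
    · rintro (h | h | h | h)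
      · exact ⟨_, h, Or.inl rfl⟩
      · exact ⟨_, h, Or.inr (Or.inl rfl)⟩
      · exact ⟨_, h, Or.inr (Or.inr (Or.inl rfl))⟩
      · exact ⟨_, h, Or.inr (Or.inr (Or.inr rfl))⟩
  have hle := pvMR_le L
  split_ifs with hf hr hd hs
  · have : pvMR L = 4 := by have := h4.mpr hf; omega
    simp [pvName, this]
  · have : pvMR L = 3 := by
      have := h3.mpr (Or.inr hr)
      have h4' : ¬ (4 ≤ pvMR L) := fun h => hf (h4.mp h)
      omega
    simp [pvName, this]
  · have : pvMR L = 2 := by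
      have := h2.mpr (Or.inr (Or.inr hd))
      have h3' : ¬ (3 ≤ pvMR L) := fun h => (h3.mp h).elim hf hr
      omega
    simp [pvName, this]
  · have : pvMR L = 1 := by
      have := h1.mpr (Or.inr (Or.inr (Or.inr hs)))
      have h2' : ¬ (2 ≤ pvMR L) := fun h => (h2.mp h).elim hf (fun h' => h'.elim hr hd)
      omega
    simp [pvName, this]
  · have : pvMR L = 0 := by
      have h1' : ¬ (1 ≤ pvMR L) := fun h =>
        (h1.mp h).elim hf (fun h' => h'.elim hr (fun h'' => h''.elim hd hs))
      omega
    simp [pvName, this]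

-- ===== VERDICT (by name: the statement is the Claim_ definition above) =====
theorem aggregate_meta_whatsapp_status_py_spec : Claim_equal_aggregate_meta_whatsapp_status_py := by
  intro receipts _
  unfold Spec_aggregate_meta_whatsapp_status_py
  unfold aggregate_meta_whatsapp_status_py aggregate_meta_whatsapp_status_py_alt
  by_cases h : receipts = []
  · simp [h]
  · simp only [h, if_false, PySem.Set.mem_ofList]
    have hB : List.foldl (fun (best : Nat) item => max best (pvRank (pvNorm item))) 0 (List.map Prod.snd receipts)
        = pvMR (List.map pvNorm (List.map Prod.snd receipts)) := by
      simp [pvMR, List.foldl_map]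
    rw [hB]
    exact pvCore _
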